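-- pv_equiv track=rewrite | github.com/lblock181/WebForm | server/src/packages/utility.py | duplicate_dict_keys_in_list
-- ===== SOURCE A (Python) =====
-- from typing import Callable, Union
--
-- def duplicate_dict_keys_in_list(target_dict:dict, sub_dict_keyword:str) -> Union[bool, set]:
--     key_set = set()
--     ret_val = None
--     for sub_dict in target_dict[sub_dict_keyword]:
--         for key in sub_dict.keys():
--             if key not in key_set:
--                 key_set.add(key)
--             else:
--                 ret_val = True
--     if ret_val == None:
--         ret_val = False
--     return ret_val, key_set
-- ===== SOURCE B (Python) =====
-- def duplicate_dict_keys_in_list(target_dict: dict, sub_dict_keyword: str):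
--     dicts = target_dict[sub_dict_keyword]
--     key_set = {key for sub_dict in dicts for key in sub_dict.keys()}
--     total = sum(len(sub_dict) for sub_dict in dicts)
--     return total != len(key_set), key_set
-- ===== Notes on version B (the rewrite author's own statement) =====
-- stated objective: simpler
-- what changed: Replaces the stateful double loop with a membership test per key by a set comprehension for the union of keys plus a count-vs-cardinality comparison (sum of dict sizes != size of the union) to detect cross-dict duplicates.
import Mathlib
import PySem

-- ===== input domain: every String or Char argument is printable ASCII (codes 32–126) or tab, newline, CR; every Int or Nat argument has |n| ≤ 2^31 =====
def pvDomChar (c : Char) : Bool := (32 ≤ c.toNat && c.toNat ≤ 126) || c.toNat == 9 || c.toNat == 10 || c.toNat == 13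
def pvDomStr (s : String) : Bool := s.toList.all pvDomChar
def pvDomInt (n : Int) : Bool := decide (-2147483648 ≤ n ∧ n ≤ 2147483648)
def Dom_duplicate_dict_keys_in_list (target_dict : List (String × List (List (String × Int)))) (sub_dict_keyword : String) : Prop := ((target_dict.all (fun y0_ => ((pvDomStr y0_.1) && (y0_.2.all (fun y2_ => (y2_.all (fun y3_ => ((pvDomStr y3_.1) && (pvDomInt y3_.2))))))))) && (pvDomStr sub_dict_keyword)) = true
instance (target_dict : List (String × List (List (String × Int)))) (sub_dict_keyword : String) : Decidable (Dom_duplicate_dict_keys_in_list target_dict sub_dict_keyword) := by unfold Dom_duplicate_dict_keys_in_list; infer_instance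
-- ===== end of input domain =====

-- B replaces A's stateful double loop (mutable key_set + ret_val flag) by a set comprehension for
-- the union of keys and a count-vs-cardinality test; same result, simpler decomposition.

-- keys of a Python dict given as an association list: first occurrences of the keys, in order
def pvKeysOf (d : List (String × Int)) : List String := PySem.Set.ofList (d.map Prod.fst)

-- ===== PORT A =====
def duplicate_dict_keys_in_list (target_dict : List (String × List (List (String × Int)))) (sub_dict_keyword : String) : Bool × List String :=
  match (PySem.Dict.ofList target_dict).get? sub_dict_keyword with
  | none => (false, [])  -- KeyError in Python; excluded by Pre_
  | some dicts =>
    -- key_set = set(); ret_val = None; nested for-loops with membership test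
    let st := dicts.foldl
      (fun (st : PySem.Set String × Option Bool) sub_dict =>
        (pvKeysOf sub_dict).foldl
          (fun (st : PySem.Set String × Option Bool) key =>
            if ¬ (PySem.Set.contains st.1 key = true) then (PySem.Set.add st.1 key, st.2)
            else (st.1, some true))
          st)
      (PySem.Set.empty, none)
    ((match st.2 with | none => false | some b => b), st.1)

-- ===== PORT B =====
def duplicate_dict_keys_in_list_alt (target_dict : List (String × List (List (String × Int)))) (sub_dict_keyword : String) : Bool × List String :=
  match (PySem.Dict.ofList target_dict).get? sub_dict_keyword with
  | none => (false, [])  -- KeyError in Python; excluded by Pre_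
  | some dicts =>
    let key_set : PySem.Set String := PySem.Set.ofList (dicts.flatMap pvKeysOf)
    let total : Nat := dicts.foldl (fun acc sub_dict => acc + (pvKeysOf sub_dict).length) 0
    (decide (total ≠ key_set.length), key_set)

-- ===== PRECONDITION & SPEC =====
-- Pre_ excludes exactly the inputs on which Python A raises KeyError: sub_dict_keyword absent from target_dict.
def Pre_duplicate_dict_keys_in_list (target_dict : List (String × List (List (String × Int)))) (sub_dict_keyword : String) : Prop :=
  (target_dict.map Prod.fst).contains sub_dict_keyword = true
instance (target_dict : List (String × List (List (String × Int)))) (sub_dict_keyword : String) : Decidable (Pre_duplicate_dict_keys_in_list target_dict sub_dict_keyword) := by unfold Pre_duplicate_dict_keys_in_list; infer_instance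
def pvWitness_duplicate_dict_keys_in_list : (List (String × List (List (String × Int)))) × String :=
  ([("rows", [[("a", 1)], [("a", 2), ("b", 3)]])], "rows")

def Spec_duplicate_dict_keys_in_list (target_dict : List (String × List (List (String × Int)))) (sub_dict_keyword : String) (out : Bool × List String) : Prop := out = duplicate_dict_keys_in_list_alt target_dict sub_dict_keyword
instance (target_dict : List (String × List (List (String × Int)))) (sub_dict_keyword : String) (out : Bool × List String) : Decidable (Spec_duplicate_dict_keys_in_list target_dict sub_dict_keyword out) := by unfold Spec_duplicate_dict_keys_in_list; infer_instance

-- ===== CLAIM (what is proved, stated in full; the proofs are below) =====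
def Claim_equal_duplicate_dict_keys_in_list : Prop := ∀ (target_dict : List (String × List (List (String × Int)))) (sub_dict_keyword : String), Dom_duplicate_dict_keys_in_list target_dict sub_dict_keyword → Pre_duplicate_dict_keys_in_list target_dict sub_dict_keyword → Spec_duplicate_dict_keys_in_list target_dict sub_dict_keyword (duplicate_dict_keys_in_list target_dict sub_dict_keyword)

-- ===== LEMMAS AND PROOFS =====

-- the inner loop body of A
def pvStep (st : PySem.Set String × Option Bool) (key : String) : PySem.Set String × Option Bool :=
  if ¬ (PySem.Set.contains st.1 key = true) then (PySem.Set.add st.1 key, st.2)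
  else (st.1, some true)

lemma pvLenAdd_le (s : PySem.Set String) (k : String) :
    (PySem.Set.add s k).length ≤ s.length + 1 := by
  rw [PySem.Set.add_eq_ite]
  split_ifs <;> simp

lemma pvLenUpdate_le (ks : List String) (s : PySem.Set String) :
    (PySem.Set.update s ks).length ≤ s.length + ks.length := by
  induction ks generalizing s with
  | nil => simp [PySem.Set.update]
  | cons k ks ih =>
    rw [PySem.Set.update_cons]
    calc (PySem.Set.update (PySem.Set.add s k) ks).length
        ≤ (PySem.Set.add s k).length + ks.length := ih _
      _ ≤ s.length + 1 + ks.length := by have := pvLenAdd_le s k; omega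
      _ = s.length + (k :: ks).length := by simp; omega

-- the invariant of A's loop over a flat list of keys
lemma pvLoop (ks : List String) (s : PySem.Set String) (r : Option Bool) :
    ks.foldl pvStep (s, r) =
      (PySem.Set.update s ks,
       if (PySem.Set.update s ks).length = s.length + ks.length then r else some true) := by
  induction ks generalizing s r with
  | nil => simp [PySem.Set.update]
  | cons k ks ih =>
    rw [List.foldl_cons, PySem.Set.update_cons]
    by_cases hk : k ∈ s
    · have hstep : pvStep (s, r) k = (s, some true) := by
        simp [pvStep, hk]
      rw [hstep, ih, PySem.Set.add_of_mem hk]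
      have hle := pvLenUpdate_le ks s
      have hcond : ¬ (PySem.Set.update s ks).length = s.length + (k :: ks).length := by
        simp only [List.length_cons]; omega
      rw [if_neg hcond, ite_self]
    · have hstep : pvStep (s, r) k = (PySem.Set.add s k, r) := by
        simp [pvStep, hk]
      rw [hstep, ih]
      have hlen : (PySem.Set.add s k).length = s.length + 1 := by
        rw [PySem.Set.add_of_not_mem hk]; simp
      rw [hlen]
      simp only [List.length_cons]
      have harith : List.length s + 1 + ks.length = List.length s + (ks.length + 1) := by omega
      rw [harith]
      rfl

lemma pvFoldl_flat (dicts : List (List (String × Int))) (st : PySem.Set String × Option Bool) :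
    dicts.foldl (fun st sub_dict => (pvKeysOf sub_dict).foldl pvStep st) st
      = (dicts.flatMap pvKeysOf).foldl pvStep st := by
  induction dicts generalizing st with
  | nil => simp
  | cons d ds ih => simp [List.flatMap_cons, List.foldl_append, ih]

lemma pvTotal_flat (dicts : List (List (String × Int))) (acc : Nat) :
    dicts.foldl (fun acc sub_dict => acc + (pvKeysOf sub_dict).length) acc
      = acc + (dicts.flatMap pvKeysOf).length := by
  induction dicts generalizing acc with
  | nil => simp
  | cons d ds ih => simp [List.flatMap_cons, ih]; omega

-- ===== VERDICT (by name: the statement is the Claim_ definition above) =====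
theorem duplicate_dict_keys_in_list_spec : Claim_equal_duplicate_dict_keys_in_list := by
  intro td kw _ _
  unfold Spec_duplicate_dict_keys_in_list duplicate_dict_keys_in_list duplicate_dict_keys_in_list_alt
  cases hget : (PySem.Dict.ofList td).get? kw with
  | none => rfl
  | some dicts =>
    simp only
    have hA : dicts.foldl
        (fun (st : PySem.Set String × Option Bool) sub_dict =>
          (pvKeysOf sub_dict).foldl
            (fun st key =>
              if ¬ (PySem.Set.contains st.1 key = true) then (PySem.Set.add st.1 key, st.2)
              else (st.1, some true)) st)
        (PySem.Set.empty, none)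
      = (dicts.flatMap pvKeysOf).foldl pvStep (PySem.Set.empty, none) := pvFoldl_flat dicts _
    rw [hA, pvLoop]
    set ks := dicts.flatMap pvKeysOf with hks
    rw [pvTotal_flat]
    have hupd : PySem.Set.update PySem.Set.empty ks = PySem.Set.ofList ks :=
      PySem.Set.update_nil_left ks
    rw [hupd]
    simp only [PySem.Set.empty, List.length_nil, Nat.zero_add]
    have hsum : (List.map (fun a => (pvKeysOf a).length) dicts).sum = ks.length := by
      rw [hks, List.length_flatMap]
    by_cases h : (PySem.Set.ofList ks).length = ks.length
    · simp [h, hsum]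
    · have hne : ks.length ≠ (PySem.Set.ofList ks).length := fun e => h (Eq.symm e)
      simp [h, hsum, hne]
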